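-- pv_equiv track=rewrite | github.com/rfoldbirk/Pacman | maze.py | tileToPosition
-- ===== SOURCE A (Python) =====
-- def tileToPosition(x, y):
-- 	position = { "x": 0, "y": 0 }
--
-- 	# Beregning af den korrekte y position
-- 	for i in range(0, y+1):
-- 		addTo = 12
-- 		if i >= 17:
-- 			addTo = 16
--
-- 		position["y"] += addTo
--
-- 	# Beregning af den korrekte x position
-- 	for i in range(0, x+1):
-- 		addTo = 12
-- 		if i == 1 or i == 16:
-- 			addTo = 16
--
-- 		position["x"] += addTo
--
-- 	return position
-- ===== SOURCE B (Python) =====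
-- def tileToPosition(x, y):
-- 	# Closed form: each of the y+1 rows adds 12, rows with index >= 17 add 4 extra;
-- 	# each of the x+1 columns adds 12, columns 1 and 16 add 4 extra.
-- 	ypix = 0 if y < 0 else 12 * (y + 1) + 4 * max(0, y - 16)
-- 	xpix = 0 if x < 0 else 12 * (x + 1) + 4 * ((1 if x >= 1 else 0) + (1 if x >= 16 else 0))
-- 	return {"x": xpix, "y": ypix}
-- ===== Notes on version B (the rewrite author's own statement) =====
-- stated objective: faster
-- what changed: Replaced the two O(x)/O(y) accumulation loops by closed-form arithmetic that counts the special-offset indices (rows >= 17, columns 1 and 16) directly.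
import Mathlib
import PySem

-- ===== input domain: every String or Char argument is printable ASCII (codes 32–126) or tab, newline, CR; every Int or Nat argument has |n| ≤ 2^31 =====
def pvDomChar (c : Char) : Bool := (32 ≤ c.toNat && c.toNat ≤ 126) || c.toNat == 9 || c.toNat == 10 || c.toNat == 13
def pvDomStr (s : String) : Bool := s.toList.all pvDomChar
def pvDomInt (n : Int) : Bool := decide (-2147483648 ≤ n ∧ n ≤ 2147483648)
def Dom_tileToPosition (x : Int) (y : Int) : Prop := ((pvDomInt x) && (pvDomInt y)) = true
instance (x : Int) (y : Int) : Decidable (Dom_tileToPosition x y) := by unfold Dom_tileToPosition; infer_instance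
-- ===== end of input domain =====

-- B replaces A's two accumulation loops by closed-form arithmetic counting the special-offset indices (O(1) instead of O(x+y)).

-- ===== PORT A =====
def tileToPosition (x : Int) (y : Int) : List (String × Int) :=
  let position : PySem.Dict String Int := PySem.Dict.ofList [("x", 0), ("y", 0)]
  let position := (PySem.List.pyRange 0 (y + 1) 1).foldl (fun d i =>
    let addTo : Int := 12
    let addTo := if i ≥ 17 then 16 else addTo
    d.modify "y" 0 (fun v => v + addTo)) position
  let position := (PySem.List.pyRange 0 (x + 1) 1).foldl (fun d i =>
    let addTo : Int := 12
    let addTo := if i == 1 || i == 16 then 16 else addTo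
    d.modify "x" 0 (fun v => v + addTo)) position
  position.items

-- ===== PORT B =====
def tileToPosition_alt (x : Int) (y : Int) : List (String × Int) :=
  let ypix : Int := if y < 0 then 0 else 12 * (y + 1) + 4 * (max 0 (y - 16))
  let xpix : Int := if x < 0 then 0 else
    12 * (x + 1) + 4 * ((if x ≥ 1 then (1 : Int) else 0) + (if x ≥ 16 then (1 : Int) else 0))
  [("x", xpix), ("y", ypix)]

-- ===== PRECONDITION & SPEC =====
def Spec_tileToPosition (x : Int) (y : Int) (out : List (String × Int)) : Prop := out = tileToPosition_alt x y
instance (x : Int) (y : Int) (out : List (String × Int)) : Decidable (Spec_tileToPosition x y out) := by unfold Spec_tileToPosition; infer_instance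

-- ===== CLAIM (what is proved, stated in full; the proofs are below) =====
def Claim_equal_tileToPosition : Prop := ∀ (x : Int) (y : Int), Dom_tileToPosition x y → Spec_tileToPosition x y (tileToPosition x y)

-- ===== LEMMAS AND PROOFS =====

-- adding (f i) at a fixed key accumulates the sum of f over the list
theorem pvGetD_loop_self (k : String) (f : Int → Int) (l : List Int) (d : PySem.Dict String Int) :
    (l.foldl (fun d i => d.modify k 0 (fun v => v + f i)) d).getD k 0
      = d.getD k 0 + (l.map f).sum := by
  induction l generalizing d with
  | nil => simp
  | cons a t ih =>
    simp only [List.foldl_cons, List.map_cons, List.sum_cons, ih,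
      PySem.Dict.getD_modify_self]
    ring

-- the loop at key k does not touch key k'
theorem pvGetD_loop_ne (k k' : String) (hne : k' ≠ k) (f : Int → Int) (l : List Int)
    (d : PySem.Dict String Int) :
    (l.foldl (fun d i => d.modify k 0 (fun v => v + f i)) d).getD k' 0 = d.getD k' 0 := by
  induction l generalizing d with
  | nil => rfl
  | cons a t ih =>
    rw [List.foldl_cons, ih, PySem.Dict.getD_modify]
    simp [hne]

-- modifying a key that is present leaves the key list unchanged
theorem pvKeys_loop (k : String) (f : Int → Int) (l : List Int) (d : PySem.Dict String Int)
    (h : d.contains k = true) :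
    (l.foldl (fun d i => d.modify k 0 (fun v => v + f i)) d).keys = d.keys := by
  induction l generalizing d with
  | nil => rfl
  | cons a t ih =>
    rw [List.foldl_cons, ih _ (by simp [PySem.Dict.contains_modify, h]),
      PySem.Dict.keys_modify]
    simp [PySem.Dict.keys_insert_of_contains, h]

theorem pvSum_y (n : Nat) :
    ((PySem.List.pyRange 0 (n : Int) 1).map
        (fun i => if i ≥ (17 : Int) then (16 : Int) else 12)).sum
      = 12 * n + 4 * max 0 ((n : Int) - 17) := by
  induction n with
  | zero => simp [PySem.List.pyRange_one_eq_nil]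
  | succ m ih =>
    have h : ((m : Int) + 1) = ((m + 1 : Nat) : Int) := by push_cast; ring
    rw [← h, PySem.List.pyRange_one_succ_right (by positivity),
      List.map_append, List.sum_append, ih]
    simp only [List.map_cons, List.map_nil, List.sum_cons, List.sum_nil]
    split_ifs <;> push_cast <;> omega

theorem pvSum_x (n : Nat) :
    ((PySem.List.pyRange 0 (n : Int) 1).map
        (fun i => if (i == (1 : Int) || i == 16) then (16 : Int) else 12)).sum
      = 12 * n + 4 * ((if (2 : Int) ≤ n then (1 : Int) else 0) + (if (17 : Int) ≤ n then (1 : Int) else 0)) := by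
  induction n with
  | zero => simp [PySem.List.pyRange_one_eq_nil]
  | succ m ih =>
    have h : ((m : Int) + 1) = ((m + 1 : Nat) : Int) := by push_cast; ring
    rw [← h, PySem.List.pyRange_one_succ_right (by positivity),
      List.map_append, List.sum_append, ih]
    simp only [List.map_cons, List.map_nil, List.sum_cons, List.sum_nil, beq_iff_eq,
      Bool.or_eq_true]
    split_ifs <;> push_cast at * <;> omega

-- ===== VERDICT (by name: the statement is the Claim_ definition above) =====
theorem tileToPosition_spec : Claim_equal_tileToPosition := by
  intro x y _
  unfold Spec_tileToPosition tileToPosition tileToPosition_alt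
  dsimp only
  set d0 : PySem.Dict String Int := PySem.Dict.ofList [("x", 0), ("y", 0)] with hd0
  set d1 := (PySem.List.pyRange 0 (y + 1) 1).foldl
      (fun d i => d.modify "y" 0 (fun v => v + if i ≥ 17 then 16 else 12)) d0 with hd1
  set d2 := (PySem.List.pyRange 0 (x + 1) 1).foldl
      (fun d i => d.modify "x" 0 (fun v => v + if (i == 1 || i == 16) then 16 else 12)) d1 with hd2
  have hk1 : d1.keys = d0.keys := pvKeys_loop "y" _ _ d0 (by decide)
  have hcx : d1.contains "x" = true := by
    rw [PySem.Dict.contains_iff_mem_keys, hk1]; decide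
  have hk2 : d2.keys = ["x", "y"] := by
    rw [hd2, pvKeys_loop "x" _ _ d1 hcx, hk1]; decide
  have hnd : d2.keys.Nodup := by rw [hk2]; decide
  have hgx : d2.getD "x" 0 = ((PySem.List.pyRange 0 (x + 1) 1).map
      (fun i => if (i == (1 : Int) || i == 16) then (16 : Int) else 12)).sum := by
    rw [hd2, pvGetD_loop_self, hd1, pvGetD_loop_ne "y" "x" (by decide)]
    have h0 : d0.getD "x" 0 = 0 := by rw [hd0]; decide
    rw [h0, zero_add]
  have hgy : d2.getD "y" 0 = ((PySem.List.pyRange 0 (y + 1) 1).map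
      (fun i => if i ≥ (17 : Int) then (16 : Int) else 12)).sum := by
    rw [hd2, pvGetD_loop_ne "x" "y" (by decide), hd1, pvGetD_loop_self]
    have h0 : d0.getD "y" 0 = 0 := by rw [hd0]; decide
    rw [h0, zero_add]
  rw [PySem.Dict.items_eq_map_keys d2 hnd 0, hk2]
  simp only [List.map_cons, List.map_nil, hgx, hgy]
  have hx : ((PySem.List.pyRange 0 (x + 1) 1).map
      (fun i => if (i == (1 : Int) || i == 16) then (16 : Int) else 12)).sum
      = if x < 0 then 0 else
          12 * (x + 1) + 4 * ((if x ≥ 1 then (1 : Int) else 0) + (if x ≥ 16 then (1 : Int) else 0)) := by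
    by_cases h : x < 0
    · rw [PySem.List.pyRange_one_eq_nil (by omega)]; simp [h]
    · have hc : (x + 1) = (((x + 1).toNat : Nat) : Int) := (Int.toNat_of_nonneg (by omega)).symm
      rw [hc, pvSum_x]
      simp only [if_neg h]
      split_ifs <;> omega
  have hy : ((PySem.List.pyRange 0 (y + 1) 1).map
      (fun i => if i ≥ (17 : Int) then (16 : Int) else 12)).sum
      = if y < 0 then 0 else 12 * (y + 1) + 4 * (max 0 (y - 16)) := by
    by_cases h : y < 0
    · rw [PySem.List.pyRange_one_eq_nil (by omega)]; simp [h]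
    · have hc : (y + 1) = (((y + 1).toNat : Nat) : Int) := (Int.toNat_of_nonneg (by omega)).symm
      rw [hc, pvSum_y]
      simp only [if_neg h]
      omega
  rw [hx, hy]
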